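-- pv_equiv track=rewrite | github.com/khloe1425/luyenthihsgioi | THCS/2023_2024/VinhPhuc_2324/Bai1/pair.py | count_prime_pairs
-- ===== SOURCE A (Python) =====
-- def sieve_of_eratosthenes(n):
--     is_prime = [True] * (n + 1)
--     is_prime[0] = is_prime[1] = False  # 0 và 1 không phải là số nguyên tố
--     for i in range(2, int(n**0.5) + 1):
--         if is_prime[i]:
--             for j in range(i * i, n + 1, i):
--                 is_prime[j] = False
--     return is_prime
--
-- def count_prime_pairs(n, k):
--     is_prime = sieve_of_eratosthenes(n)
--     count = 0
--     for x in range(2, n - k + 1):  # x phải lớn hơn 1 và y = x + k <= n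
--         y = x + k
--         if is_prime[x] and y <= n and is_prime[y]:
--             count += 1
--     return count
-- ===== SOURCE B (Python) =====
-- def sieve_of_eratosthenes(n):
--     is_prime = [True] * (n + 1)
--     is_prime[0] = is_prime[1] = False
--     for i in range(2, int(n**0.5) + 1):
--         if is_prime[i]:
--             for j in range(i * i, n + 1, i):
--                 is_prime[j] = False
--     return is_prime
--
--
-- def count_prime_pairs(n, k):
--     is_prime = sieve_of_eratosthenes(n)
--     primes = [i for i in range(n + 1) if is_prime[i]]
--     shifted = [p - k for p in primes]
--     # two-pointer merge over the two sorted lists: count common elements,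
--     # i.e. primes p with p + k prime and p + k <= n
--     count = 0
--     i = j = 0
--     while i < len(primes) and j < len(shifted):
--         if primes[i] < shifted[j]:
--             i += 1
--         elif shifted[j] < primes[i]:
--             j += 1
--         else:
--             count += 1
--             i += 1
--             j += 1
--     return count
-- ===== Notes on version B (the rewrite author's own statement) =====
-- stated objective: alternative
-- what changed: B keeps the sieve but gathers the primes into a sorted list and counts pairs by a two-pointer merge of that list with its shift [p - k], instead of scanning every integer x in range(2, n-k+1) and indexing the boolean array twice per x; as a by-product B also returns the correct pair count for negative k where A raises IndexError.
-- crash fix: For 1 <= n <= 10^6 and k < 0 A raises IndexError (its loop indexes is_prime[x] for x up to n-k > n), while B returns the count of prime pairs (p, p+k), e.g. B(10,-3) = 1 (the n cap only keeps the sieve allocation feasible when the region is sampled). — e.g. on count_prime_pairs(10, -3): A raises IndexError, B returns 1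
import Mathlib
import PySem

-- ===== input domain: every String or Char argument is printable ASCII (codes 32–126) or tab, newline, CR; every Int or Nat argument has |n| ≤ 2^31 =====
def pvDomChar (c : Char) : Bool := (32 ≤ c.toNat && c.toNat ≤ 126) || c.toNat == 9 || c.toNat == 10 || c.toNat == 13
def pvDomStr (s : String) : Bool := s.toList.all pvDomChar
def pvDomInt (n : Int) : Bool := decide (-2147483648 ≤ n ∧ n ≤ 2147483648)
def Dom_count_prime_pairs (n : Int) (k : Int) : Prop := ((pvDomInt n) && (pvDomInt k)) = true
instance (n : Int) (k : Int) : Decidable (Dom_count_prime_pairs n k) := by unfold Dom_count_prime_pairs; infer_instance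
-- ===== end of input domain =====

-- B keeps A's sieve but counts by a two-pointer merge of the sorted prime list with its shift
-- [p - k], instead of scanning every integer in range(2, n-k+1) (objective: alternative algorithm).

-- ===== PORT A =====
-- helper shared verbatim by both Pythons (Source B contains the identical sieve).
-- The Python list is ported as Array Bool (constant-time indexing, as in Python);
-- in-place assignment is Array.setIfInBounds (all writes are in bounds for n ≥ 1, the Pre_ domain).
-- int(n**0.5) is ported as pvIsqrt (floor square root, kernel-transparent),
-- exact for 0 ≤ n ≤ 2^31 (double sqrt is exactly rounded there).
def pvIsqrtGo (n : Nat) : Nat → Nat → Nat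
  | 0, acc => acc
  | fuel + 1, acc => if (acc + 1) * (acc + 1) ≤ n then pvIsqrtGo n fuel (acc + 1) else acc

def pvIsqrt (n : Nat) : Nat := pvIsqrtGo n n 0

def sieve_of_eratosthenes (n : Int) : Array Bool :=
  let ip0 := ((Array.replicate (n + 1).toNat true).setIfInBounds 0 false).setIfInBounds 1 false
  (PySem.List.pyRange 2 ((pvIsqrt n.toNat : Int) + 1) 1).foldl
    (fun ip i =>
      if ip.getD i.toNat false then
        (PySem.List.pyRange (i * i) (n + 1) i).foldl
          (fun ip' j => ip'.setIfInBounds j.toNat false) ip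
      else ip) ip0

-- is_prime[x] is read as .getD x.toNat false: exact for the nonnegative in-range indices the
-- loop reaches on the Pre_ domain (n ≥ 1, k ≥ 0); elsewhere Python A raises and nothing is claimed.
def count_prime_pairs (n : Int) (k : Int) : Int :=
  let is_prime := sieve_of_eratosthenes n
  (PySem.List.pyRange 2 (n - k + 1) 1).foldl
    (fun count x =>
      let y := x + k
      if is_prime.getD x.toNat false && decide (y ≤ n) && is_prime.getD y.toNat false
      then count + 1 else count) 0

-- ===== PORT B =====
-- B's while-loop two-pointer scan: advancing a pointer past an element is taking the tail,
-- count is the accumulator; fuel = total length bounds the loop (one element consumed per step).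
def mergeCountGo : Nat → List Int → List Int → Int → Int
  | 0, _, _, count => count
  | _ + 1, [], _, count => count
  | _ + 1, _ :: _, [], count => count
  | fuel + 1, x :: xs, y :: ys, count =>
    if x < y then mergeCountGo fuel xs (y :: ys) count
    else if y < x then mergeCountGo fuel (x :: xs) ys count
    else mergeCountGo fuel xs ys (count + 1)

def mergeCount (xs ys : List Int) : Int := mergeCountGo (xs.length + ys.length) xs ys 0

def count_prime_pairs_alt (n : Int) (k : Int) : Int :=
  let is_prime := sieve_of_eratosthenes n
  let primes : List Int := (PySem.List.pyRange 0 (n + 1) 1).filter (fun i => is_prime.getD i.toNat false)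
  let shifted : List Int := primes.map (fun p => p - k)
  mergeCount primes shifted

-- ===== PRECONDITION & SPEC =====
-- Pre_ is exactly where the Python A returns: for n < 1 the sieve's is_prime[0]/is_prime[1]
-- assignment raises IndexError, and for k < 0 the counting loop reads is_prime[x] with x up to
-- n - k > n and raises IndexError.
def Pre_count_prime_pairs (n : Int) (k : Int) : Prop := 1 ≤ n ∧ 0 ≤ k
instance (n : Int) (k : Int) : Decidable (Pre_count_prime_pairs n k) := by
  unfold Pre_count_prime_pairs; infer_instance
def pvWitness_count_prime_pairs : Int × Int := (10, 2)

-- For 1 ≤ n and k < 0 A raises IndexError (it indexes is_prime[x] for x up to n-k > n), while B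
-- returns the count of prime pairs (p, p+k); the region is capped at n ≤ 10^6 only so that the
-- sieve allocation stays feasible when the region is sampled (beyond it both programs exhaust memory).
def Raises_count_prime_pairs (n : Int) (k : Int) : Prop := 1 ≤ n ∧ n ≤ 1000000 ∧ k < 0
instance (n : Int) (k : Int) : Decidable (Raises_count_prime_pairs n k) := by
  unfold Raises_count_prime_pairs; infer_instance
def pvRaiseWitness_count_prime_pairs : Int × Int := (10, -3)
def pvRaiseWitnessOut_count_prime_pairs : Int := 1

def Spec_count_prime_pairs (n : Int) (k : Int) (out : Int) : Prop := out = count_prime_pairs_alt n k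
instance (n : Int) (k : Int) (out : Int) : Decidable (Spec_count_prime_pairs n k out) := by
  unfold Spec_count_prime_pairs; infer_instance

-- ===== CLAIM (what is proved, stated in full; the proofs are below) =====
def Claim_equal_count_prime_pairs : Prop := ∀ (n : Int) (k : Int), Dom_count_prime_pairs n k → Pre_count_prime_pairs n k → Spec_count_prime_pairs n k (count_prime_pairs n k)
def Claim_raises_count_prime_pairs : Prop := (∀ (n : Int) (k : Int), Dom_count_prime_pairs n k → Raises_count_prime_pairs n k → ¬ Pre_count_prime_pairs n k) ∧ (Dom_count_prime_pairs (pvRaiseWitness_count_prime_pairs.1) (pvRaiseWitness_count_prime_pairs.2) ∧ Raises_count_prime_pairs (pvRaiseWitness_count_prime_pairs.1) (pvRaiseWitness_count_prime_pairs.2) ∧ count_prime_pairs_alt (pvRaiseWitness_count_prime_pairs.1) (pvRaiseWitness_count_prime_pairs.2) = pvRaiseWitnessOut_count_prime_pairs)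

-- ===== LEMMAS AND PROOFS =====

theorem foldl_pres {σ α : Type} (P : σ → Prop) (f : σ → α → σ) (l : List α)
    (h : ∀ s x, x ∈ l → P s → P (f s x)) (s : σ) (hs : P s) : P (l.foldl f s) := by
  induction l generalizing s with
  | nil => exact hs
  | cons a t ih =>
    exact ih (fun s x hx => h s x (List.mem_cons_of_mem _ hx)) _ (h s a List.mem_cons_self hs)

theorem setIfInBounds_false_keep (a : Array Bool) (j m : Nat) (h : a[m]? = some false) :
    (a.setIfInBounds j false)[m]? = some false := by
  have hm : m < a.size := by
    by_contra hge
    rw [Array.getElem?_eq_none (by omega)] at h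
    simp at h
  rw [Array.getElem?_setIfInBounds]
  by_cases hj : j = m
  · subst hj; simp [hm]
  · simp [hj, h]

theorem get?_sieve_lt_two (n : Int) (hn : 1 ≤ n) (m : Nat) (hm : m < 2) :
    (sieve_of_eratosthenes n)[m]? = some false := by
  unfold sieve_of_eratosthenes
  apply foldl_pres (P := fun s : Array Bool => s[m]? = some false)
  · intro s i _ hs
    split
    · apply foldl_pres (P := fun s : Array Bool => s[m]? = some false)
      · intro s' j _ hs'
        exact setIfInBounds_false_keep s' j.toNat m hs'
      · exact hs
    · exact hs
  · have hL : 2 ≤ (Array.replicate (n + 1).toNat (true : Bool)).size := by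
      simp [Array.size_replicate]; omega
    interval_cases m <;>
      simp_all [Array.getElem?_setIfInBounds, Array.size_setIfInBounds] <;> omega

theorem mergeCountGo_eq (fuel : Nat) : ∀ (xs ys : List Int) (count : Int),
    xs.length + ys.length ≤ fuel →
    xs.Pairwise (· < ·) → ys.Pairwise (· < ·) →
    mergeCountGo fuel xs ys count = count + ((xs.filter (fun x => decide (x ∈ ys))).length : Int) := by
  induction fuel with
  | zero =>
    intro xs ys count h _ _
    cases xs with
    | nil => simp [mergeCountGo]
    | cons x xs => simp at h
  | succ fuel ih =>
    intro xs ys count h hxs hys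
    match xs, ys with
    | [], _ => simp [mergeCountGo]
    | x :: xs', [] => simp [mergeCountGo]
    | x :: xs', y :: ys' =>
      simp only [mergeCountGo]
      obtain ⟨hx, hxs'⟩ := List.pairwise_cons.mp hxs
      obtain ⟨hy, hys'⟩ := List.pairwise_cons.mp hys
      by_cases h1 : x < y
      · rw [if_pos h1, ih xs' (y :: ys') count (by simp at h ⊢; omega) hxs' hys]
        have hxnot : x ∉ y :: ys' := by
          intro hmem
          rcases List.mem_cons.mp hmem with rfl | hmem
          · omega
          · exact absurd (hy _ hmem) (by omega)
        have hd : ¬ (x = y ∨ x ∈ ys') := by simpa using hxnot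
        simp [hd]
      · by_cases h2 : y < x
        · rw [if_neg h1, if_pos h2, ih (x :: xs') ys' count (by simp at h ⊢; omega) hxs hys']
          have hcg : ∀ z ∈ x :: xs', (decide (z ∈ y :: ys')) = (decide (z ∈ ys')) := by
            intro z hz
            have hzgt : y < z := by
              rcases List.mem_cons.mp hz with rfl | hz'
              · exact h2
              · exact lt_trans h2 (hx _ hz')
            by_cases hzy : z ∈ ys'
            · simp [hzy, List.mem_cons]
            · simp [hzy, List.mem_cons]; omega
          rw [List.filter_congr hcg]
        · have hxy : x = y := by omega
          rw [if_neg h1, if_neg h2, ih xs' ys' (count + 1) (by simp at h ⊢; omega) hxs' hys']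
          have hxin : x ∈ y :: ys' := by simp [hxy]
          have hcg : ∀ z ∈ xs', (decide (z ∈ y :: ys')) = (decide (z ∈ ys')) := by
            intro z hz
            have := hx z hz
            by_cases hzy : z ∈ ys'
            · simp [hzy, List.mem_cons]
            · simp [hzy, List.mem_cons]; omega
          rw [List.filter_cons, List.filter_congr hcg]
          simp [hxin]
          ring

-- ===== VERDICT (by name: the statement is the Claim_ definition above) =====
theorem count_prime_pairs_spec : Claim_equal_count_prime_pairs := by
  intro n k _ hpre
  obtain ⟨hn, hk⟩ := hpre
  unfold Spec_count_prime_pairs count_prime_pairs count_prime_pairs_alt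
  simp only []
  set arr := sieve_of_eratosthenes n with harr
  have hc2 : ∀ j : Int, 0 ≤ j → j < 2 → arr.getD j.toNat false = false := by
    intro j hj0 hj2
    rw [Array.getD_eq_getD_getElem?, harr, get?_sieve_lt_two n hn j.toNat (by omega)]
    rfl
  -- A's loop is a countP over range(2, n-k+1)
  rw [PySem.List.foldl_if_add_one
    (fun x => arr.getD x.toNat false && decide (x + k ≤ n) && arr.getD (x + k).toNat false)]
  -- B's merge over the two sorted lists counts the primes p with p + k prime and p + k ≤ n
  have hsortp : ((PySem.List.pyRange 0 (n + 1) 1).filter (fun i => arr.getD i.toNat false)).Pairwise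
      ((· < ·) : Int → Int → Prop) :=
    (PySem.List.pairwise_lt_pyRange_one 0 (n + 1)).filter _
  have hsorts : (((PySem.List.pyRange 0 (n + 1) 1).filter (fun i => arr.getD i.toNat false)).map
      (fun p => p - k)).Pairwise ((· < ·) : Int → Int → Prop) :=
    hsortp.map _ (fun _ _ h => by omega)
  rw [mergeCount, mergeCountGo_eq _ _ _ _ (le_refl _) hsortp hsorts]
  -- membership in shifted = [p - k for p in primes] is membership of x + k among the primes
  rw [List.filter_congr (q := fun x => decide (x + k ∈
      (PySem.List.pyRange 0 (n + 1) 1).filter (fun i => arr.getD i.toNat false)))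
    (fun x _ => by
      apply decide_eq_decide.mpr
      simp only [List.mem_map]
      constructor
      · rintro ⟨p, hp, rfl⟩; simpa using hp
      · intro hp; exact ⟨x + k, hp, by omega⟩)]
  -- membership among the primes is the sieve test with the range bounds
  have hcont : ∀ x : Int,
      decide (x ∈ (PySem.List.pyRange 0 (n + 1) 1).filter (fun i => arr.getD i.toNat false))
      = (decide (0 ≤ x) && decide (x < n + 1) && arr.getD x.toNat false) := by
    intro x
    by_cases hx : x ∈ (PySem.List.pyRange 0 (n + 1) 1).filter (fun i => arr.getD i.toNat false)
    · have h2 := List.mem_filter.mp hx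
      have h3 := PySem.List.mem_pyRange_one.mp h2.1
      simp [h2.2, h3.1, h3.2]
      simpa using h2.2
    · have hfalse : decide (x ∈ (PySem.List.pyRange 0 (n + 1) 1).filter
          (fun i => arr.getD i.toNat false)) = false := by simpa using hx
      rw [hfalse]
      rw [List.mem_filter] at hx
      by_cases h0 : 0 ≤ x
      · by_cases hxn : x < n + 1
        · have : arr.getD x.toNat false = false := by
            cases h : arr.getD x.toNat false
            · rfl
            · exact absurd ⟨PySem.List.mem_pyRange_one.mpr ⟨h0, hxn⟩, h⟩ hx
          simp [this]
        · simp [hxn]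
      · simp [h0]
  rw [List.filter_congr (q := fun x => decide (0 ≤ x + k) && decide (x + k < n + 1) &&
      arr.getD (x + k).toNat false) (fun x _ => hcont (x + k))]
  -- the filtered-primes count is a countP over range(0, n+1)
  rw [← List.countP_eq_length_filter, List.countP_filter]
  -- pointwise on [0, n+1) the two tests agree
  have hcongr : (PySem.List.pyRange 0 (n + 1)).countP
        (fun a => (decide (0 ≤ a + k) && decide (a + k < n + 1) && arr.getD (a + k).toNat false)
          && arr.getD a.toNat false)
      = (PySem.List.pyRange 0 (n + 1)).countP
          (fun x => arr.getD x.toNat false && decide (x + k ≤ n) && arr.getD (x + k).toNat false) := by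
    apply List.countP_congr
    intro j hj
    have hj' := PySem.List.mem_pyRange_one.mp hj
    have e1 : decide (0 ≤ j + k) = true := by simp; omega
    have e2 : decide (j + k < n + 1) = decide (j + k ≤ n) := by
      by_cases h : j + k ≤ n <;> simp [h]
    rw [e1, e2]
    cases hd : decide (j + k ≤ n) <;> cases h1 : arr.getD j.toNat false <;>
      cases h2 : arr.getD (j + k).toNat false <;> simp
  rw [hcongr]
  -- the two ranges carry the same count: 0,1 are not prime, and above n-k the test y ≤ n fails
  have hlow : ∀ j ∈ PySem.List.pyRange (0:Int) 2,
      ¬ ((arr.getD j.toNat false && decide (j + k ≤ n) && arr.getD (j + k).toNat false) = true) := by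
    intro j hj
    have hj' := PySem.List.mem_pyRange_one.mp hj
    simp [hc2 j hj'.1 hj'.2]
  have hhigh : ∀ j ∈ PySem.List.pyRange (n - k + 1) (n + 1),
      ¬ ((arr.getD j.toNat false && decide (j + k ≤ n) && arr.getD (j + k).toNat false) = true) := by
    intro j hj
    have hj' := PySem.List.mem_pyRange_one.mp hj
    have : decide (j + k ≤ n) = false := by simp; omega
    simp [this]
  by_cases hbig : n - k + 1 < 2
  · rw [PySem.List.pyRange_one_eq_nil (by omega : n - k + 1 ≤ 2)]
    have : (PySem.List.pyRange (0:Int) (n + 1)).countP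
        (fun x => arr.getD x.toNat false && decide (x + k ≤ n) && arr.getD (x + k).toNat false) = 0 := by
      apply List.countP_eq_zero.mpr
      intro j hj
      have hj' := PySem.List.mem_pyRange_one.mp hj
      by_cases hj2 : j < 2
      · simp [hc2 j hj'.1 hj2]
      · have : decide (j + k ≤ n) = false := by simp; omega
        simp [this]
    rw [this]
    simp
  · rw [PySem.List.pyRange_one_append 0 2 (n + 1) (by omega) (by omega),
      PySem.List.pyRange_one_append 2 (n - k + 1) (n + 1) (by omega) (by omega)]
    simp only [List.countP_append, List.countP_eq_zero.mpr hlow, List.countP_eq_zero.mpr hhigh]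
    push_cast
    ring

theorem count_prime_pairs_raises : Claim_raises_count_prime_pairs := by
  unfold Claim_raises_count_prime_pairs
  refine ⟨fun n k _ hr hp => ?_, by decide⟩
  unfold Raises_count_prime_pairs at hr
  unfold Pre_count_prime_pairs at hp
  omega

-- self-check: the crash-fix witness really lies inside Raises_ and B's port returns the stated value there
theorem pvRaiseWitness_count_prime_pairs_ok :
    Raises_count_prime_pairs pvRaiseWitness_count_prime_pairs.1 pvRaiseWitness_count_prime_pairs.2 ∧
      count_prime_pairs_alt pvRaiseWitness_count_prime_pairs.1 pvRaiseWitness_count_prime_pairs.2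
        = pvRaiseWitnessOut_count_prime_pairs :=
  ⟨count_prime_pairs_raises.2.2.1, count_prime_pairs_raises.2.2.2⟩
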